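-- pv_equiv track=rewrite | github.com/hamzeasadi/videonoisprintGAN | src/engine.py | getfakrealidx
-- ===== SOURCE A (Python) =====
-- def getfakrealidx(batch_size, numcams):
--     frmprcam = batch_size//numcams
--     fakeidx = []
--     realidx = []
--     for i in range(0, batch_size, frmprcam):
--         for j in range(frmprcam//2):
--             fakeidx.append(i + j)
--             realidx.append(i+frmprcam//2 + j)
--     return fakeidx, realidx
-- ===== SOURCE B (Python) =====
-- def getfakrealidx(batch_size, numcams):
--     frmprcam = batch_size // numcams
--     half = frmprcam // 2
--     nblocks = max(0, -((-batch_size) // frmprcam))  # len(range(0, batch_size, frmprcam))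
--     total = nblocks * half
--     fakeidx = [(k // half) * frmprcam + k % half for k in range(total)]
--     realidx = [(k // half) * frmprcam + half + k % half for k in range(total)]
--     return fakeidx, realidx
-- ===== Notes on version B (the rewrite author's own statement) =====
-- stated objective: alternative
-- what changed: Replaces the two nested append loops by a closed-form block count (ceiling division) and two flat map passes over a single index range, recovering block and offset with divmod.
import Mathlib
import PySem

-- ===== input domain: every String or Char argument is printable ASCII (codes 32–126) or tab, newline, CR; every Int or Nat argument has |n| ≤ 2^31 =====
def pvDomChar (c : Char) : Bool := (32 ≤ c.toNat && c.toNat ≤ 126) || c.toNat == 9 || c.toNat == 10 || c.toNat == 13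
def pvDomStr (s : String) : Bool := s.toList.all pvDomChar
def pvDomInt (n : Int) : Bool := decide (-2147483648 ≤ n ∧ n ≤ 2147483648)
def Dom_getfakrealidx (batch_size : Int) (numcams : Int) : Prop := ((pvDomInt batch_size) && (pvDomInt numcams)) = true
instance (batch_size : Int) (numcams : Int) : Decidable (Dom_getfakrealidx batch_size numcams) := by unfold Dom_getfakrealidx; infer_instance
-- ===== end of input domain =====

-- B replaces A's nested append loops by a closed-form block count and one flat divmod pass per list (alternative decomposition, same cost).

-- ===== PORT A =====
def getfakrealidx (batch_size : Int) (numcams : Int) : List Int × List Int :=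
  let frmprcam := PySem.Int.floordiv batch_size numcams
  (PySem.List.pyRange 0 batch_size frmprcam).foldl
    (fun acc i =>
      (PySem.List.pyRange 0 (PySem.Int.floordiv frmprcam 2) 1).foldl
        (fun acc2 j => (acc2.1 ++ [i + j], acc2.2 ++ [i + PySem.Int.floordiv frmprcam 2 + j])) acc)
    ([], [])

-- ===== PORT B =====
def getfakrealidx_alt (batch_size : Int) (numcams : Int) : List Int × List Int :=
  let frmprcam := PySem.Int.floordiv batch_size numcams
  let half := PySem.Int.floordiv frmprcam 2
  let nblocks := max 0 (-(PySem.Int.floordiv (-batch_size) frmprcam))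
  let total := nblocks * half
  ((PySem.List.pyRange 0 total 1).map
      (fun k => PySem.Int.floordiv k half * frmprcam + PySem.Int.mod k half),
   (PySem.List.pyRange 0 total 1).map
      (fun k => PySem.Int.floordiv k half * frmprcam + half + PySem.Int.mod k half))

-- ===== PRECONDITION & SPEC =====
-- Pre_ excludes numcams = 0 (Python A raises ZeroDivisionError) and batch_size//numcams = 0
-- (Python A raises ValueError from range(..., 0)); A returns on all other inputs.
def Pre_getfakrealidx (batch_size : Int) (numcams : Int) : Prop :=
  numcams ≠ 0 ∧ PySem.Int.floordiv batch_size numcams ≠ 0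
instance (batch_size : Int) (numcams : Int) : Decidable (Pre_getfakrealidx batch_size numcams) := by unfold Pre_getfakrealidx; infer_instance
def pvWitness_getfakrealidx : Int × Int := (8, 2)

def Spec_getfakrealidx (batch_size : Int) (numcams : Int) (out : List Int × List Int) : Prop := out = getfakrealidx_alt batch_size numcams
instance (batch_size : Int) (numcams : Int) (out : List Int × List Int) : Decidable (Spec_getfakrealidx batch_size numcams out) := by unfold Spec_getfakrealidx; infer_instance

-- ===== CLAIM (what is proved, stated in full; the proofs are below) =====
def Claim_equal_getfakrealidx : Prop := ∀ (batch_size : Int) (numcams : Int), Dom_getfakrealidx batch_size numcams → Pre_getfakrealidx batch_size numcams → Spec_getfakrealidx batch_size numcams (getfakrealidx batch_size numcams)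

-- ===== LEMMAS AND PROOFS =====

-- ceiling division: -((-a) // f) = (a + f - 1) / f for 0 < f
theorem pvCeil (a f : Int) (hf : 0 < f) :
    -(PySem.Int.floordiv (-a) f) = (a + f - 1) / f := by
  rw [PySem.Int.neg_floordiv_neg_eq_iff_of_pos hf]
  have h := Int.mul_ediv_add_emod (a + f - 1) f
  have hr0 : 0 ≤ (a + f - 1) % f := Int.emod_nonneg _ (by omega)
  have hrf : (a + f - 1) % f < f := Int.emod_lt_of_pos _ hf
  constructor <;> nlinarith [h, hr0, hrf]

-- One flat divmod pass over range(nb*half) is the concatenation of nb blocks.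
theorem pvB_blocks (half : Int) (hh : 0 < half) (F : Int → Int → Int) (nb : Nat) :
    (PySem.List.pyRange 0 ((nb : Int) * half) 1).map
        (fun k => F (PySem.Int.floordiv k half) (PySem.Int.mod k half))
    = (List.range nb).flatMap (fun (b : Nat) => (PySem.List.pyRange 0 half 1).map (fun j => F (b : Int) j)) := by
  induction nb with
  | zero => simp [PySem.List.pyRange_one_eq_nil]
  | succ n ih =>
    have hc : ((n + 1 : Nat) : Int) * half = (n : Int) * half + half := by push_cast; ring
    rw [hc, PySem.List.pyRange_one_append 0 ((n : Int) * half) ((n : Int) * half + half)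
          (by positivity) (by linarith),
        List.map_append, ih, List.range_succ, List.flatMap_append]
    congr 1
    simp only [List.flatMap_cons, List.flatMap_nil, List.append_nil]
    rw [PySem.List.pyRange_one ((n : Int) * half), PySem.List.pyRange_one 0 half]
    have ht : ((n : Int) * half + half - (n : Int) * half).toNat = (half - 0 : Int).toNat := by
      congr 1; ring
    rw [ht, List.map_map, List.map_map]
    apply List.map_congr_left
    intro k hk
    have hk' : (k : Int) < half := by
      have := List.mem_range.mp hk
      omega
    have hk0 : (0 : Int) ≤ k := by positivity
    simp only [Function.comp]
    have e1 : (n : Int) * half + (k : Int) = (k : Int) + half * n := by ring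
    rw [e1, PySem.Int.floordiv_eq_ediv_of_pos hh, PySem.Int.mod_eq_emod_of_pos hh,
        Int.add_mul_ediv_left _ _ (by omega), Int.add_mul_emod_self_left,
        Int.ediv_eq_zero_of_lt hk0 hk', Int.emod_eq_of_lt hk0 hk']
    norm_num

-- A's nested fold, with the pair split and the singleton appends turned into maps.
theorem pvA_flat (outer : List Int) (half : Int) :
    outer.foldl
      (fun acc i =>
        (PySem.List.pyRange 0 half 1).foldl
          (fun acc2 j => (acc2.1 ++ [i + j], acc2.2 ++ [i + half + j])) acc)
      (([], []) : List Int × List Int)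
    = (outer.flatMap (fun i => (PySem.List.pyRange 0 half 1).map (fun j => i + j)),
       outer.flatMap (fun i => (PySem.List.pyRange 0 half 1).map (fun j => i + half + j))) := by
  rw [PySem.List.foldl_congr_mem outer _
      (fun acc i => (acc.1 ++ (PySem.List.pyRange 0 half 1).map (fun j => i + j),
                     acc.2 ++ (PySem.List.pyRange 0 half 1).map (fun j => i + half + j)))
      ([], [])
      (by
        intro acc i _
        obtain ⟨a, b⟩ := acc
        rw [PySem.List.foldl_prod_mk (f := fun s j => s ++ [i + j]) (g := fun s j => s ++ [i + half + j])]
        rw [PySem.List.foldl_append_singleton_eq_map, PySem.List.foldl_append_singleton_eq_map])]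
  rw [PySem.List.foldl_prod_mk (f := fun s i => s ++ (PySem.List.pyRange 0 half 1).map (fun j => i + j))
      (g := fun s i => s ++ (PySem.List.pyRange 0 half 1).map (fun j => i + half + j))]
  simp [← List.flatMap_def]

theorem pvMain (batch_size numcams : Int) (hnc : numcams ≠ 0)
    (hf : PySem.Int.floordiv batch_size numcams ≠ 0) :
    getfakrealidx batch_size numcams = getfakrealidx_alt batch_size numcams := by
  simp only [getfakrealidx, getfakrealidx_alt]
  set f := PySem.Int.floordiv batch_size numcams with hfdef
  set half := PySem.Int.floordiv f 2 with hhdef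
  have h2 : half = f / 2 := PySem.Int.floordiv_eq_ediv_of_pos (by norm_num)
  by_cases hhalf : half ≤ 0
  · -- inner range empty on A's side, total ≤ 0 on B's side
    have htot : max 0 (-(PySem.Int.floordiv (-batch_size) f)) * half ≤ 0 :=
      mul_nonpos_of_nonneg_of_nonpos (le_max_left 0 _) hhalf
    rw [PySem.List.pyRange_one_eq_nil hhalf, PySem.List.pyRange_one_eq_nil htot]
    simp [List.foldl_fixed]
  · rw [not_le] at hhalf
    have hfpos : 0 < f := by omega
    by_cases hbs : batch_size ≤ 0
    · -- A's outer range empty; B's block count is 0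
      have hdnn : 0 ≤ PySem.Int.floordiv (-batch_size) f := by
        rw [PySem.Int.floordiv_eq_ediv_of_pos hfpos]
        exact Int.ediv_nonneg (by omega) (le_of_lt hfpos)
      have hmax : max 0 (-(PySem.Int.floordiv (-batch_size) f)) = 0 := by omega
      rw [PySem.List.pyRange_of_pos 0 batch_size hfpos, if_neg (by omega), hmax]
      simp [PySem.List.pyRange_one_eq_nil]
    · rw [not_le] at hbs
      set q := (batch_size + f - 1) / f with hqdef
      have hceil : -(PySem.Int.floordiv (-batch_size) f) = q := pvCeil batch_size f hfpos
      have hqpos : 0 < q := by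
        have : (1 : Int) ≤ q := by
          rw [hqdef, Int.le_ediv_iff_mul_le hfpos]; omega
        omega
      have hmax : max 0 (-(PySem.Int.floordiv (-batch_size) f)) = q := by omega
      have hqnat : q = (q.toNat : Int) := (Int.toNat_of_nonneg (le_of_lt hqpos)).symm
      rw [PySem.List.pyRange_of_pos 0 batch_size hfpos, if_pos hbs, hmax]
      have hN : (batch_size - 0 + f - 1) = batch_size + f - 1 := by ring
      rw [hN, ← hqdef, pvA_flat, hqnat,
          pvB_blocks half hhalf (fun a b => a * f + b) q.toNat,
          pvB_blocks half hhalf (fun a b => a * f + half + b) q.toNat]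
      simp only [Int.toNat_natCast, Prod.mk.injEq]
      constructor <;>
        · rw [List.flatMap_map]
          congr 1
          funext k
          congr 1
          funext j
          ring

-- ===== VERDICT (by name: the statement is the Claim_ definition above) =====
theorem getfakrealidx_spec : Claim_equal_getfakrealidx := by
  intro batch_size numcams _ hpre
  exact pvMain batch_size numcams hpre.1 hpre.2
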